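-- pv_equiv track=rewrite | github.com/GrootBeard/ObjectTracker | tracking/filters/jipdaf.py | _generate_tau_i_events
-- ===== SOURCE A (Python) =====
-- def _generate_tau_i_events(t_index: int, mt_index: int, assignments: list[int]) -> list[list[int]]:
--     M = assignments.copy()
--     M.pop(t_index)
--     u = [] if mt_index == 0 else [mt_index]
--     if 0 in u:
--         u.remove(0)
--
--     events = []
--     _enumerate_events(M, events, u, [])
--
--     for e in events:
--         e.insert(t_index, mt_index)
--
--     return events
--
-- def _enumerate_events(M, E, u, v, d=0) -> None:
--     if d == len(M):
--         E.append(v)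
--         return
--
--     for i in M[d]:
--         if i not in u:
--             vnew = v.copy()
--             vnew.append(i)
--             unew = u.copy()
--             # feasible events can have multiple tracks with no measurement assigned
--             if i != 0:
--                 unew.append(i)
--             _enumerate_events(M, E, unew, vnew, d+1)
-- ===== SOURCE B (Python) =====
-- def _generate_tau_i_events(t_index: int, mt_index: int, assignments: list[int]) -> list[list[int]]:
--     M = assignments.copy()
--     M.pop(t_index)
--     u0 = [] if mt_index == 0 else [mt_index]
--     # iterative level-wise (FIFO) expansion of partial assignment states
--     states = [([], u0)]
--     for row in M:
--         states = [(v + [i], u + ([i] if i != 0 else []))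
--                   for (v, u) in states
--                   for i in row
--                   if i not in u]
--     events = []
--     for v, _ in states:
--         v.insert(t_index, mt_index)
--         events.append(v)
--     return events
-- ===== Notes on version B (the rewrite author's own statement) =====
-- stated objective: alternative
-- what changed: The recursive DFS helper _enumerate_events is replaced by an iterative level-wise worklist: one pass over the rows of M expands a list of partial (event, used-measurements) states by a comprehension, producing the same events in the same order.
import Mathlib
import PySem

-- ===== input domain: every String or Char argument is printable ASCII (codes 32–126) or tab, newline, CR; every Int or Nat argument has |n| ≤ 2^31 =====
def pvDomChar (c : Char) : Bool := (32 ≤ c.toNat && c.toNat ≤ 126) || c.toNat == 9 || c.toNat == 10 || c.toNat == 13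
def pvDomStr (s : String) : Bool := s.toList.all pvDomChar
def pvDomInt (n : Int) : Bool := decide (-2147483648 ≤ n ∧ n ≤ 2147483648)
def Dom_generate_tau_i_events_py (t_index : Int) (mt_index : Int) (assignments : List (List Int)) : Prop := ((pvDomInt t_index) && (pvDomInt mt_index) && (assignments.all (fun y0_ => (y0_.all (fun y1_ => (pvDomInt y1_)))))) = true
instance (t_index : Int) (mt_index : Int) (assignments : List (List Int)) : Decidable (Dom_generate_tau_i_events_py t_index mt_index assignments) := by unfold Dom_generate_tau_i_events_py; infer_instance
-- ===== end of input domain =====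

-- B replaces A's recursive DFS event enumeration by an iterative level-wise worklist fold (alternative decomposition, same cost).
set_option maxRecDepth 4000


-- ===== PORT A =====
-- _enumerate_events(M, E, u, v, d): recursion over the suffix of M from d (the suffix IS the remaining list),
-- the inner `for i in M[d]` is the second (structurally smaller) recursion pvEnumRow.
mutual
def pvEnumA : List (List Int) → List (List Int) → List Int → List Int → List (List Int)
  | [], E, _, v => E ++ [v]
  | row :: rest, E, u, v => pvEnumRow row rest E u v
  termination_by M _ _ _ => (M.length + 1, 0)
  decreasing_by simp; omega
def pvEnumRow : List Int → List (List Int) → List (List Int) → List Int → List Int → List (List Int)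
  | [], _, E, _, _ => E
  | i :: row, rest, E, u, v =>
    if i ∈ u then pvEnumRow row rest E u v
    else pvEnumRow row rest (pvEnumA rest E (if i ≠ 0 then u ++ [i] else u) (v ++ [i])) u v
  termination_by row rest _ _ _ => (rest.length + 1, row.length + 1)
  decreasing_by all_goals (simp; omega)
end

def generate_tau_i_events_py (t_index : Int) (mt_index : Int) (assignments : List (List Int)) : List (List Int) :=
  match PySem.List.pop? assignments t_index with
  | none => []  -- M.pop(t_index) raises IndexError: excluded by Pre_
  | some (_, M) =>
    let u := if mt_index = 0 then ([] : List Int) else [mt_index]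
    let u := if 0 ∈ u then (PySem.List.remove? u 0).getD u else u  -- guard makes remove? always some
    let events := pvEnumA M [] u []
    events.map (fun e => PySem.List.insert e t_index mt_index)

-- ===== PORT B =====
-- one level of the worklist expansion: the list comprehension over (v,u) states and feasible i in row
def pvStepB (states : List (List Int × List Int)) (row : List Int) : List (List Int × List Int) :=
  states.flatMap (fun s =>
    (row.filter (fun i => !(s.2.contains i))).map
      (fun i => (s.1 ++ [i], s.2 ++ (if i ≠ 0 then [i] else []))))

def generate_tau_i_events_py_alt (t_index : Int) (mt_index : Int) (assignments : List (List Int)) : List (List Int) :=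
  match PySem.List.pop? assignments t_index with
  | none => []  -- M.pop(t_index) raises IndexError: excluded by Pre_
  | some (_, M) =>
    let u0 := if mt_index = 0 then ([] : List Int) else [mt_index]
    let states := M.foldl pvStepB [([], u0)]
    states.map (fun s => PySem.List.insert s.1 t_index mt_index)

-- ===== PRECONDITION & SPEC =====
-- A raises IndexError on M.pop(t_index) when t_index is out of range; Pre_ excludes exactly those inputs.
def Pre_generate_tau_i_events_py (t_index : Int) (mt_index : Int) (assignments : List (List Int)) : Prop :=
  PySem.Raise.InRange assignments.length t_index
instance (t_index : Int) (mt_index : Int) (assignments : List (List Int)) : Decidable (Pre_generate_tau_i_events_py t_index mt_index assignments) := by unfold Pre_generate_tau_i_events_py; infer_instance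

def pvWitness_generate_tau_i_events_py : Int × Int × List (List Int) := (0, 1, [[0, 1, 2]])

def Spec_generate_tau_i_events_py (t_index : Int) (mt_index : Int) (assignments : List (List Int)) (out : List (List Int)) : Prop := out = generate_tau_i_events_py_alt t_index mt_index assignments
instance (t_index : Int) (mt_index : Int) (assignments : List (List Int)) (out : List (List Int)) : Decidable (Spec_generate_tau_i_events_py t_index mt_index assignments out) := by unfold Spec_generate_tau_i_events_py; infer_instance

-- ===== CLAIM (what is proved, stated in full; the proofs are below) =====
def Claim_equal_generate_tau_i_events_py : Prop := ∀ (t_index : Int) (mt_index : Int) (assignments : List (List Int)), Dom_generate_tau_i_events_py t_index mt_index assignments → Pre_generate_tau_i_events_py t_index mt_index assignments → Spec_generate_tau_i_events_py t_index mt_index assignments (generate_tau_i_events_py t_index mt_index assignments)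

-- ===== LEMMAS AND PROOFS =====

theorem pvEnumRow_acc
    (rest : List (List Int))
    (hA : ∀ E u v, pvEnumA rest E u v = E ++ pvEnumA rest [] u v) :
    ∀ (row : List Int) (E : List (List Int)) (u v : List Int),
      pvEnumRow row rest E u v = E ++ pvEnumRow row rest [] u v := by
  intro row
  induction row with
  | nil => intro E u v; simp only [pvEnumRow]; exact (List.append_nil E).symm
  | cons i row ih =>
    intro E u v
    by_cases h : i ∈ u
    · simp only [pvEnumRow, if_pos h]; exact ih E u v
    · simp only [pvEnumRow, if_neg h]
      rw [ih, hA, ih (pvEnumA rest [] (if i ≠ 0 then u ++ [i] else u) (v ++ [i]))]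
      simp

theorem pvEnumA_acc :
    ∀ (M : List (List Int)) (E : List (List Int)) (u v : List Int),
      pvEnumA M E u v = E ++ pvEnumA M [] u v := by
  intro M
  induction M with
  | nil => intro E u v; simp [pvEnumA]
  | cons row rest ih =>
    intro E u v
    simp only [pvEnumA]
    exact pvEnumRow_acc rest ih row E u v

theorem pvStepB_row (rest : List (List Int)) :
    ∀ (row : List Int) (u v : List Int),
      ((row.filter (fun i => !(u.contains i))).map
        (fun i => (v ++ [i], u ++ (if i ≠ 0 then [i] else [])))).flatMap
          (fun s => pvEnumA rest [] s.2 s.1)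
      = pvEnumRow row rest [] u v := by
  intro row
  induction row with
  | nil => intro u v; simp [pvEnumRow]
  | cons i row ih =>
    intro u v
    by_cases h : i ∈ u
    · simpa [pvEnumRow, h, List.filter_cons] using ih u v
    · have hc : (u.contains i) = false := by simpa using h
      have hif : u ++ (if i ≠ 0 then [i] else []) = if i ≠ 0 then u ++ [i] else u := by
        split_ifs <;> simp
      simp only [pvEnumRow, if_neg h, List.filter_cons, hc, Bool.not_false, if_pos trivial]
      simp only [List.map_cons, List.flatMap_cons]
      rw [ih u v, hif,
        pvEnumRow_acc rest (pvEnumA_acc rest) row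
          (pvEnumA rest [] (if i ≠ 0 then u ++ [i] else u) (v ++ [i]))]

theorem pvFoldB_map_fst :
    ∀ (M : List (List Int)) (states : List (List Int × List Int)),
      (M.foldl pvStepB states).map Prod.fst
        = states.flatMap (fun s => pvEnumA M [] s.2 s.1) := by
  intro M
  induction M with
  | nil =>
    intro states
    induction states with
    | nil => simp
    | cons s ss ih2 => simp_all [pvEnumA]
  | cons row rest ih =>
    intro states
    rw [List.foldl_cons, ih]
    show (pvStepB states row).flatMap _ = _
    rw [pvStepB, List.flatMap_assoc]
    refine List.flatMap_congr ?_
    intro s _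
    simpa [pvEnumA] using pvStepB_row rest row s.2 s.1

-- ===== VERDICT (by name: the statement is the Claim_ definition above) =====
theorem generate_tau_i_events_py_spec : Claim_equal_generate_tau_i_events_py := by
  intro t_index mt_index assignments _ _
  unfold Spec_generate_tau_i_events_py generate_tau_i_events_py generate_tau_i_events_py_alt
  cases hpop : PySem.List.pop? assignments t_index with
  | none => rfl
  | some r =>
    obtain ⟨x, M⟩ := r
    simp only
    have hu : (if 0 ∈ (if mt_index = 0 then ([] : List Int) else [mt_index]) then
        (PySem.List.remove? (if mt_index = 0 then ([] : List Int) else [mt_index]) 0).getD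
          (if mt_index = 0 then ([] : List Int) else [mt_index])
      else (if mt_index = 0 then ([] : List Int) else [mt_index]))
        = (if mt_index = 0 then ([] : List Int) else [mt_index]) := by
      by_cases h : mt_index = 0
      · simp [h]
      · simp only [if_neg h]
        rw [if_neg]
        simp [h, eq_comm]
    rw [hu]
    have := pvFoldB_map_fst M [([], if mt_index = 0 then ([] : List Int) else [mt_index])]
    simp only [List.flatMap_cons, List.flatMap_nil, List.append_nil] at this
    rw [← this, List.map_map]
    rfl
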